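-- pv_equiv track=rewrite | github.com/sutd-automated-programming-tools/clara-s | tests/data/midterm/midterm/2018375/Q6/submission_1/q6_work.py | get_stationline
-- ===== SOURCE A (Python) =====
-- def get_stationline(mrt):
--     st_dct = {}
--     for key in mrt:
--         for values in mrt[key]:
--             if values in st_dct: #avoid removing the initial key
--                 st_dct[values].append(key)
--             else:
--                 st_dct[values] = [key]
--     return st_dct
-- ===== SOURCE B (Python) =====
-- def get_stationline(mrt):
--     # Pass 1: distinct station names in first-encounter order.
--     targets = []
--     for line in mrt:
--         for v in mrt[line]:
--             if v not in targets:
--                 targets.append(v)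
--     # Pass 2: for each station, collect its lines (one append per occurrence).
--     return {v: [key for key in mrt for s in mrt[key] if s == v] for v in targets}
-- ===== Notes on version B (the rewrite author's own statement) =====
-- stated objective: alternative
-- what changed: B first enumerates the distinct station names in first-encounter order, then builds each station's line list by a fresh scan over the whole mapping, instead of A's single pass that grows an inverted dict in place.
import Mathlib
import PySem

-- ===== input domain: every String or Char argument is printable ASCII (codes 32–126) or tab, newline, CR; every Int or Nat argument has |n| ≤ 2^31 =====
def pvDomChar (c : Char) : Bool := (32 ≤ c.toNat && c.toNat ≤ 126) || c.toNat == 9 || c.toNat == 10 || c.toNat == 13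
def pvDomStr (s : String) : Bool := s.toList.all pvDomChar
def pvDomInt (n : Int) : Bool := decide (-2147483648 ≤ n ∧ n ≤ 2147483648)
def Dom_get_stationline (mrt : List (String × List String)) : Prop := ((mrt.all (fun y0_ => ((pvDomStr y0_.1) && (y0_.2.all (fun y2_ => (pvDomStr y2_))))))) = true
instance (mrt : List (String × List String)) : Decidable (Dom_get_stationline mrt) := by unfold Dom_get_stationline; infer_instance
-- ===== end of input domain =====

-- B enumerates the distinct stations first and then scans the map once per station
-- (alternative decomposition, same results); A builds the inverted dict in one pass.


-- ===== PORT A =====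
-- 'for key in mrt: for values in mrt[key]:' iterates the dict's items; a Python dict's
-- keys are distinct, so iterating the (key, value) pairs is exact.
def get_stationline (mrt : List (String × List String)) : List (String × List String) :=
  (mrt.foldl (fun st_dct p =>
      p.2.foldl (fun st_dct values =>
        if st_dct.contains values then
          st_dct.modify values [] (fun l => l ++ [p.1])   -- st_dct[values].append(key)
        else
          st_dct.insert values [p.1]) st_dct)
    (PySem.Dict.empty : PySem.Dict String (List String))).items

-- ===== PORT B =====
def get_stationline_alt (mrt : List (String × List String)) : List (String × List String) :=
  let targets := mrt.foldl (fun ts p =>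
      p.2.foldl (fun ts v => if ts.contains v then ts else ts ++ [v]) ts) []
  targets.map (fun v =>
    (v, mrt.flatMap (fun p => (p.2.filter (fun s => s == v)).map (fun _ => p.1))))

-- ===== PRECONDITION & SPEC =====
def Spec_get_stationline (mrt : List (String × List String)) (out : List (String × List String)) : Prop := out = get_stationline_alt mrt
instance (mrt : List (String × List String)) (out : List (String × List String)) : Decidable (Spec_get_stationline mrt out) := by unfold Spec_get_stationline; infer_instance

-- ===== CLAIM (what is proved, stated in full; the proofs are below) =====
def Claim_equal_get_stationline : Prop := ∀ (mrt : List (String × List String)), Dom_get_stationline mrt → Spec_get_stationline mrt (get_stationline mrt)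

-- ===== LEMMAS AND PROOFS =====

-- the (station, line) occurrences in A's processing order
def pvFlat (mrt : List (String × List String)) : List (String × String) :=
  mrt.flatMap (fun p => p.2.map (fun v => (v, p.1)))

-- A's if-branch is exactly Dict.modify (fresh key: getD is the default [])
theorem pv_step_eq (d : PySem.Dict String (List String)) (v k : String) :
    (if d.contains v then d.modify v [] (fun l => l ++ [k]) else d.insert v [k])
      = d.modify v [] (fun l => l ++ [k]) := by
  by_cases h : d.contains v
  · simp [h]
  · simp only [Bool.not_eq_true] at h
    simp [h, PySem.Dict.modify, PySem.Dict.getD_of_not_contains _ _ h]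

-- A's nested loop is the modify-loop over the flattened occurrence list
theorem pv_A_fold (mrt : List (String × List String)) (d : PySem.Dict String (List String)) :
    mrt.foldl (fun st_dct p =>
      p.2.foldl (fun st_dct values =>
        if st_dct.contains values then st_dct.modify values [] (fun l => l ++ [p.1])
        else st_dct.insert values [p.1]) st_dct) d
    = (pvFlat mrt).foldl (fun d p => d.modify p.1 [] (fun l => l ++ [p.2])) d := by
  induction mrt generalizing d with
  | nil => rfl
  | cons q rest ih =>
    simp only [List.foldl_cons, pvFlat, List.flatMap_cons, List.foldl_append, List.foldl_map]
    rw [ih]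
    congr 1
    exact PySem.List.foldl_congr_mem _ _ _ _ (fun d' v _ => pv_step_eq d' v q.1)

-- B's first pass is Set.ofList of the flattened station list
theorem pv_B_targets (mrt : List (String × List String)) (ts : List String) :
    mrt.foldl (fun ts p =>
      p.2.foldl (fun ts v => if ts.contains v then ts else ts ++ [v]) ts) ts
    = PySem.Set.update ts ((pvFlat mrt).map (fun p => p.1)) := by
  induction mrt generalizing ts with
  | nil => rfl
  | cons q rest ih =>
    simp only [List.foldl_cons, pvFlat, List.flatMap_cons, List.map_append, List.map_map,
      PySem.Set.update, List.foldl_append]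
    rw [ih]
    simp only [pvFlat, PySem.Set.update]
    congr 1
    simp only [Function.comp_def, List.map_id']
    apply PySem.List.foldl_congr_mem
    intro ts' v _
    simp [PySem.Set.add, PySem.Set.contains]

-- B's per-station comprehension is filter-then-project on the flattened list
theorem pv_B_row (mrt : List (String × List String)) (v : String) :
    mrt.flatMap (fun p => (p.2.filter (fun s => s == v)).map (fun _ => p.1))
    = ((pvFlat mrt).filter (fun p => p.1 == v)).map (fun p => p.2) := by
  induction mrt with
  | nil => rfl
  | cons q rest ih =>
    simp only [pvFlat, List.flatMap_cons, List.filter_append, List.map_append,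
      List.filter_map, List.map_map] at *
    rw [ih]
    congr 1

-- ===== VERDICT (by name: the statement is the Claim_ definition above) =====
theorem get_stationline_spec : Claim_equal_get_stationline := by
  intro mrt _
  unfold Spec_get_stationline get_stationline get_stationline_alt
  rw [pv_A_fold, pv_B_targets]
  have hnd : ((pvFlat mrt).foldl (fun d p => d.modify p.1 [] (fun l => l ++ [p.2]))
      (PySem.Dict.empty : PySem.Dict String (List String))).keys.Nodup := by
    exact PySem.Dict.nodup_keys_foldl_modify_key (pvFlat mrt)
      (fun p : String × String => p.1) []
      (fun _ (p : String × String) => fun l => l ++ [p.2]) PySem.Dict.empty (by simp)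
  rw [PySem.Dict.items_eq_map_keys _ hnd []]
  rw [PySem.Dict.keys_foldl_modify_key (pvFlat mrt) (fun p => p.1) []
      (fun _ p => fun l => l ++ [p.2]) PySem.Dict.empty]
  simp only [PySem.Dict.keys_empty]
  apply List.map_congr_left
  intro v _
  rw [PySem.Dict.getD_foldl_modify_append, PySem.Dict.getD_empty, pv_B_row]
  simp
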